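-- pv_equiv track=rewrite | github.com/baldFemale/LeetCode-Solution | python/HashMap/String Transforms Into Another String/String Transforms Into Another String.py | canConvert
-- ===== SOURCE A (Python) =====
-- def canConvert(str1, str2):
--     """
--     :type str1: str
--     :type str2: str
--     :rtype: bool
--     """
--     if str1 == str2:
--         return True
--     dic = {}
--
--     for i, j in zip(str1, str2):
--         if dic.setdefault(i, j) != j:
--             return False
--     return len(set(dic.values())) < 26
-- ===== SOURCE B (Python) =====
-- def canConvert(str1, str2):
--     """
--     :type str1: str
--     :type str2: str
--     :rtype: bool
--     """
--     if str1 == str2: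
--         return True
--     pairs = list(zip(str1, str2))
--     for c in {a for a, b in pairs}:
--         if len({b for a, b in pairs if a == c}) > 1:
--             return False
--     return len({b for a, b in pairs}) < 26
-- ===== Notes on version B (the rewrite author's own statement) =====
-- stated objective: alternative
-- what changed: Replaces A's single forward pass with a dict and early exit by a group-by-source check: for each distinct source character it rescans the zipped pairs and requires that character's image set to be a singleton, then counts distinct targets over the zipped positions.
import Mathlib
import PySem

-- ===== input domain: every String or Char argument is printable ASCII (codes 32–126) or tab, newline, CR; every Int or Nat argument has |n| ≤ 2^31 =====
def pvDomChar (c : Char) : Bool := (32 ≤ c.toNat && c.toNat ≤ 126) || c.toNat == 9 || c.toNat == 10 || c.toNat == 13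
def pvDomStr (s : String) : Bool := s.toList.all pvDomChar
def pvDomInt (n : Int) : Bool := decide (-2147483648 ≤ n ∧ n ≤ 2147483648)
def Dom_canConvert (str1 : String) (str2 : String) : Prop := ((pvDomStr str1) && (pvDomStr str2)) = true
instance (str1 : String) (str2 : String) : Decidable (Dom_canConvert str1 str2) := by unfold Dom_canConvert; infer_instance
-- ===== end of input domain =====

-- B replaces A's single forward pass with a dict and early exit by a group-by-source check:
-- for each distinct source character it rescans the zipped pairs and requires that character's
-- image set to be a singleton (objective: alternative — no dict, a staged nested scan).

-- ===== PORT A =====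
-- the 'for i, j in zip(str1, str2)' loop; 'return False' is modelled by 'none',
-- 'dic.setdefault(i, j)'s return value is '(dic.get? i).getD j'
def canConvertLoop : List (Char × Char) → PySem.Dict Char Char → Option (PySem.Dict Char Char)
  | [], dic => some dic
  | (i, j) :: rest, dic =>
    if (dic.get? i).getD j ≠ j then none
    else canConvertLoop rest (dic.setdefault i j)

def canConvert (str1 : String) (str2 : String) : Bool :=
  if str1 == str2 then true
  else
    match canConvertLoop (str1.toList.zip str2.toList) (PySem.Dict.mk []) with
    | none => false
    | some dic => decide (PySem.Set.len (PySem.Set.ofList dic.values) < 26)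

-- ===== PORT B =====
-- the 'for c in {a for a, b in pairs}' loop of Source B; its result is independent of the
-- set's iteration order (it is false iff SOME source char has more than one image)
def canConvertAltLoop (pairs : List (Char × Char)) : List Char → Bool
  | [] => decide (PySem.Set.len (PySem.Set.ofList (pairs.map Prod.snd)) < 26)
  | c :: cs =>
    if 1 < PySem.Set.len (PySem.Set.ofList ((pairs.filter (fun p => p.1 == c)).map Prod.snd))
    then false
    else canConvertAltLoop pairs cs

def canConvert_alt (str1 : String) (str2 : String) : Bool :=
  if str1 == str2 then true
  else
    let pairs := str1.toList.zip str2.toList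
    canConvertAltLoop pairs (PySem.Set.ofList (pairs.map Prod.fst))

-- ===== PRECONDITION & SPEC =====
def Spec_canConvert (str1 : String) (str2 : String) (out : Bool) : Prop := out = canConvert_alt str1 str2
instance (str1 : String) (str2 : String) (out : Bool) : Decidable (Spec_canConvert str1 str2 out) := by unfold Spec_canConvert; infer_instance

-- ===== CLAIM (what is proved, stated in full; the proofs are below) =====
def Claim_equal_canConvert : Prop := ∀ (str1 : String) (str2 : String), Dom_canConvert str1 str2 → Spec_canConvert str1 str2 (canConvert str1 str2)

-- ===== LEMMAS AND PROOFS =====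

-- the zipped relation is single-valued (a function)
def pvFunctional (zs : List (Char × Char)) : Prop :=
  ∀ a b c, (a, b) ∈ zs → (a, c) ∈ zs → b = c

-- every pair of zs is compatible with the bindings already in the dict
def pvConsis (d : PySem.Dict Char Char) (zs : List (Char × Char)) : Prop :=
  ∀ p ∈ zs, ∀ v, d.get? p.1 = some v → v = p.2

lemma pv_mem_items_of_get? (d : PySem.Dict Char Char) (i j : Char)
    (h : d.get? i = some j) : (i, j) ∈ d.items := by
  unfold PySem.Dict.get? at h
  cases hf : List.find? (fun q => q.1 == i) d.items with
  | none => rw [hf] at h; simp at h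
  | some q =>
    rw [hf] at h
    simp only [Option.map_some, Option.some.injEq] at h
    have hm := List.mem_of_find?_eq_some hf
    have hk : q.1 = i := by have := List.find?_some hf; simpa using this
    have hq : q = (i, j) := by cases q; simp_all
    rwa [hq] at hm

lemma pv_not_key_of_get?_none (d : PySem.Dict Char Char) (i : Char)
    (h : d.get? i = none) : ∀ p ∈ d.items, p.1 ≠ i := by
  intro p hp
  unfold PySem.Dict.get? at h
  cases hf : List.find? (fun q => q.1 == i) d.items with
  | none => have := List.find?_eq_none.mp hf p hp; simpa using this
  | some q => rw [hf] at h; simp at h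

lemma pv_loop_isSome (zs : List (Char × Char)) : ∀ d : PySem.Dict Char Char,
    (canConvertLoop zs d).isSome = true ↔ (pvFunctional zs ∧ pvConsis d zs) := by
  induction zs with
  | nil =>
    intro d
    simp only [canConvertLoop, Option.isSome_some]
    refine ⟨fun _ => ⟨fun a b c hb => by simp at hb, fun p hp => by simp at hp⟩, fun _ => trivial⟩
  | cons hd rest ih =>
    obtain ⟨i, j⟩ := hd
    intro d
    cases hv : d.get? i with
    | none =>
      have hc : d.contains i = false := by
        rw [PySem.Dict.contains_eq_isSome_get?, hv]; rfl
      simp only [canConvertLoop, hv, PySem.Dict.setdefault_of_not_contains d j hc,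
        Option.getD_none, ne_eq, not_true_eq_false, if_false]
      rw [ih (d.insert i j)]
      constructor
      · rintro ⟨hF, hC⟩
        refine ⟨?_, ?_⟩
        · intro a b c hb hcc
          simp only [List.mem_cons, Prod.mk.injEq] at hb hcc
          rcases hb with ⟨ha1, hb1⟩ | hb <;> rcases hcc with ⟨ha2, hc2⟩ | hcc
          · rw [hb1, hc2]
          · have h9 := hC (a, c) hcc j (by rw [ha1]; exact PySem.Dict.get?_insert_self d i j)
            rw [hb1]; exact h9
          · have h9 := hC (a, b) hb j (by rw [ha2]; exact PySem.Dict.get?_insert_self d i j)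
            rw [hc2]; exact h9.symm
          · exact hF a b c hb hcc
        · intro p hp v hv'
          rcases List.mem_cons.mp hp with heq | hp'
          · exfalso
            rw [heq] at hv'
            change d.get? i = some v at hv'
            rw [hv] at hv'
            cases hv'
          · by_cases hpi : p.1 = i
            · exfalso; rw [hpi, hv] at hv'; cases hv'
            · exact hC p hp' v (by rw [PySem.Dict.get?_insert_of_ne d j hpi]; exact hv')
      · rintro ⟨hF, hC⟩
        refine ⟨fun a b c hb hcc =>
          hF a b c (List.mem_cons_of_mem _ hb) (List.mem_cons_of_mem _ hcc), ?_⟩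
        intro p hp v hv'
        by_cases hpi : p.1 = i
        · rw [hpi, PySem.Dict.get?_insert_self] at hv'
          injection hv' with hvj
          have h5 : (p.1, p.2) ∈ ((i, j) :: rest) := List.mem_cons_of_mem _ (by simpa using hp)
          rw [hpi] at h5
          have h6 := hF i j p.2 (List.mem_cons_self) h5
          rw [← hvj]; exact h6
        · exact hC p (List.mem_cons_of_mem _ hp) v
            (by rw [PySem.Dict.get?_insert_of_ne d j hpi] at hv'; exact hv')
    | some w =>
      have hc : d.contains i = true := by
        rw [PySem.Dict.contains_eq_isSome_get?, hv]; rfl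
      by_cases hw : w = j
      · subst hw
        simp only [canConvertLoop, hv, PySem.Dict.setdefault_of_contains d w hc,
          Option.getD_some, ne_eq, not_true_eq_false, if_false]
        rw [ih d]
        constructor
        · rintro ⟨hF, hC⟩
          refine ⟨?_, ?_⟩
          · intro a b c hb hcc
            simp only [List.mem_cons, Prod.mk.injEq] at hb hcc
            rcases hb with ⟨ha1, hb1⟩ | hb <;> rcases hcc with ⟨ha2, hc2⟩ | hcc
            · rw [hb1, hc2]
            · have h9 := hC (a, c) hcc w (by rw [ha1]; exact hv)
              rw [hb1]; exact h9
            · have h9 := hC (a, b) hb w (by rw [ha2]; exact hv)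
              rw [hc2]; exact h9.symm
            · exact hF a b c hb hcc
          · intro p hp v hv'
            rcases List.mem_cons.mp hp with heq | hp'
            · rw [heq] at hv' ⊢
              change d.get? i = some v at hv'
              rw [hv] at hv'
              injection hv' with h7
              exact h7.symm
            · exact hC p hp' v hv'
        · rintro ⟨hF, hC⟩
          exact ⟨fun a b c hb hcc =>
              hF a b c (List.mem_cons_of_mem _ hb) (List.mem_cons_of_mem _ hcc),
            fun p hp v hv' => hC p (List.mem_cons_of_mem _ hp) v hv'⟩
      · simp only [canConvertLoop, hv, Option.getD_some, ne_eq]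
        rw [if_pos hw]
        simp only [Option.isSome_none]
        constructor
        · intro h; simp at h
        · rintro ⟨hF, hC⟩
          exact absurd (hC (i, j) List.mem_cons_self w hv) hw

lemma pv_loop_items (zs : List (Char × Char)) : ∀ d d' : PySem.Dict Char Char,
    canConvertLoop zs d = some d' → ∀ p, p ∈ d'.items ↔ (p ∈ d.items ∨ p ∈ zs) := by
  induction zs with
  | nil =>
    intro d d' h p
    simp only [canConvertLoop, Option.some.injEq] at h
    subst h; simp
  | cons hd rest ih =>
    obtain ⟨i, j⟩ := hd
    intro d d' h p
    cases hv : d.get? i with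
    | none =>
      have hc : d.contains i = false := by
        rw [PySem.Dict.contains_eq_isSome_get?, hv]; rfl
      simp only [canConvertLoop, hv, PySem.Dict.setdefault_of_not_contains d j hc,
        Option.getD_none, ne_eq] at h
      rw [if_neg (by simp)] at h
      rw [ih _ _ h p, PySem.Dict.mem_items_insert]
      simp only [List.mem_cons]
      have hnk := pv_not_key_of_get?_none d i hv
      constructor
      · rintro ((rfl | ⟨hm, _⟩) | hr)
        · exact Or.inr (Or.inl rfl)
        · exact Or.inl hm
        · exact Or.inr (Or.inr hr)
      · rintro (hm | (rfl | hr))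
        · exact Or.inl (Or.inr ⟨hm, hnk p hm⟩)
        · exact Or.inl (Or.inl rfl)
        · exact Or.inr hr
    | some w =>
      have hc : d.contains i = true := by
        rw [PySem.Dict.contains_eq_isSome_get?, hv]; rfl
      by_cases hw : w = j
      · subst hw
        simp only [canConvertLoop, hv, PySem.Dict.setdefault_of_contains d w hc,
          Option.getD_some, ne_eq] at h
        rw [if_neg (by simp)] at h
        rw [ih _ _ h p]
        simp only [List.mem_cons]
        have hm0 : (i, w) ∈ d.items := pv_mem_items_of_get? d i w hv
        constructor
        · rintro (hm | hr)
          · exact Or.inl hm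
          · exact Or.inr (Or.inr hr)
        · rintro (hm | (rfl | hr))
          · exact Or.inl hm
          · exact Or.inl hm0
          · exact Or.inr hr
      · exfalso
        simp [canConvertLoop, hv, hw] at h

-- x is an image of c under the zipped relation iff it is in c's comprehension set in B
lemma pv_mem_img (pairs : List (Char × Char)) (c x : Char) :
    x ∈ PySem.Set.ofList ((pairs.filter (fun p => p.1 == c)).map Prod.snd) ↔ (c, x) ∈ pairs := by
  rw [PySem.Set.mem_ofList]
  simp only [List.mem_map, List.mem_filter, beq_iff_eq]
  constructor
  · rintro ⟨p, ⟨hp, h1⟩, h2⟩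
    have : p = (c, x) := by cases p; simp_all
    rwa [this] at hp
  · intro h
    exact ⟨(c, x), ⟨h, rfl⟩, rfl⟩

-- a duplicate-free list has at most one element iff all its elements coincide
lemma pv_len_le_one {α : Type} (l : List α) (hnd : l.Nodup) :
    l.length ≤ 1 ↔ ∀ x ∈ l, ∀ y ∈ l, x = y := by
  cases l with
  | nil => simp
  | cons a t =>
    cases t with
    | nil => simp
    | cons b t' =>
      simp only [List.length_cons]
      constructor
      · intro h; omega
      · intro h
        have hab : a = b := h a (by simp) b (by simp)
        have : a ∉ (b :: t') := (List.nodup_cons.mp hnd).1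
        exact absurd (by rw [hab]; simp) this

-- B's per-character singleton test over all source chars is exactly single-valuedness
lemma pv_functional_iff (pairs : List (Char × Char)) :
    (∀ c ∈ PySem.Set.ofList (pairs.map Prod.fst),
        ¬ 1 < PySem.Set.len (PySem.Set.ofList ((pairs.filter (fun p => p.1 == c)).map Prod.snd)))
    ↔ pvFunctional pairs := by
  constructor
  · intro h a b c hb hcc
    have ha : a ∈ PySem.Set.ofList (pairs.map Prod.fst) := by
      rw [PySem.Set.mem_ofList]; exact List.mem_map.mpr ⟨(a, b), hb, rfl⟩
    have hle := h a ha
    rw [PySem.Set.len_eq, not_lt] at hle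
    have hle' : (PySem.Set.ofList ((pairs.filter (fun p => p.1 == a)).map Prod.snd)).length ≤ 1 := by
      exact_mod_cast hle
    have := (pv_len_le_one _ (PySem.Set.nodup_ofList _)).mp hle' b
      ((pv_mem_img pairs a b).mpr hb) c ((pv_mem_img pairs a c).mpr hcc)
    exact this
  · intro hF c _
    rw [PySem.Set.len_eq, not_lt]
    have : (PySem.Set.ofList ((pairs.filter (fun p => p.1 == c)).map Prod.snd)).length ≤ 1 := by
      rw [pv_len_le_one _ (PySem.Set.nodup_ofList _)]
      intro x hx y hy
      exact hF c x y ((pv_mem_img pairs c x).mp hx) ((pv_mem_img pairs c y).mp hy)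
    exact_mod_cast this

-- B's loop: false iff some visited source char fails the singleton test, else the final count
lemma pv_altLoop_eq (pairs : List (Char × Char)) (cs : List Char) :
    canConvertAltLoop pairs cs =
      if ∀ c ∈ cs,
          ¬ 1 < PySem.Set.len (PySem.Set.ofList ((pairs.filter (fun p => p.1 == c)).map Prod.snd))
      then decide (PySem.Set.len (PySem.Set.ofList (pairs.map Prod.snd)) < 26)
      else false := by
  induction cs with
  | nil => simp [canConvertAltLoop]
  | cons c cs ih =>
    simp only [canConvertAltLoop, ih]
    by_cases hc : 1 < PySem.Set.len (PySem.Set.ofList ((pairs.filter (fun p => p.1 == c)).map Prod.snd))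
    · rw [if_pos hc, if_neg (by push Not; exact ⟨c, by simp, by simpa using hc⟩)]
    · rw [if_neg hc]
      by_cases hall : ∀ x ∈ cs,
          ¬ 1 < PySem.Set.len (PySem.Set.ofList ((pairs.filter (fun p => p.1 == x)).map Prod.snd))
      · rw [if_pos hall, if_pos]
        intro x hx
        rcases List.mem_cons.mp hx with rfl | hx'
        · exact hc
        · exact hall x hx'
      · rw [if_neg hall, if_neg]
        intro h
        exact hall fun x hx => h x (List.mem_cons_of_mem _ hx)

lemma pv_len_ofList {α : Type} [BEq α] [LawfulBEq α] [DecidableEq α] (xs : List α) :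
    (PySem.Set.ofList xs).length = xs.toFinset.card := by
  rw [← List.toFinset_card_of_nodup (PySem.Set.nodup_ofList xs)]
  congr 1
  ext x
  simp [PySem.Set.mem_ofList]

-- ===== VERDICT (by name: the statement is the Claim_ definition above) =====
theorem canConvert_spec : Claim_equal_canConvert := by
  intro s1 s2 _
  unfold Spec_canConvert canConvert canConvert_alt
  by_cases hs : (s1 == s2) = true
  · simp [hs]
  · simp only [hs, Bool.false_eq_true, if_false]
    rw [pv_altLoop_eq]
    by_cases hf : pvFunctional (s1.toList.zip s2.toList)
    · have hcons : pvConsis (PySem.Dict.mk []) (s1.toList.zip s2.toList) := by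
        intro p hp v hv
        simp [PySem.Dict.get?] at hv
      have hsome := (pv_loop_isSome _ (PySem.Dict.mk [])).mpr ⟨hf, hcons⟩
      obtain ⟨d, hd⟩ := Option.isSome_iff_exists.mp hsome
      rw [hd, if_pos ((pv_functional_iff _).mpr hf)]
      show decide ((PySem.Set.ofList d.values).len < 26) = _
      have hval : (PySem.Set.ofList d.values).length
          = (PySem.Set.ofList ((s1.toList.zip s2.toList).map Prod.snd)).length := by
        rw [pv_len_ofList, pv_len_ofList]
        congr 1
        ext x
        simp [PySem.Dict.values, pv_loop_items _ _ _ hd]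
      rw [PySem.Set.len_eq, hval]
      simp [PySem.Set.len_eq]
    · have hnone : canConvertLoop (s1.toList.zip s2.toList) (PySem.Dict.mk []) = none := by
        cases ho : canConvertLoop (s1.toList.zip s2.toList) (PySem.Dict.mk []) with
        | none => rfl
        | some d =>
          exact absurd ((pv_loop_isSome _ _).mp (by rw [ho]; rfl)).1 hf
      rw [hnone, if_neg (fun h => hf ((pv_functional_iff _).mp h))]
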